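-- pv_equiv track=rewrite | github.com/perlamohan/aurora-restore-04292025 | lambda_layers/python/utils/validation.py | validate_snapshot_id
-- ===== SOURCE A (Python) =====
-- def validate_snapshot_id(snapshot_id: str) -> bool:
--     """
--     Validate the snapshot ID format.
--
--     Args:
--         snapshot_id: ID of the snapshot to validate
--
--     Returns:
--         bool: True if valid, False otherwise
--     """
--     if not snapshot_id:
--         return False
--
--     if len(snapshot_id) > 255:
--         return False
--
--     if not snapshot_id[0].isalnum():
--         return False
--
--     valid_chars = set('abcdefghijklmnopqrstuvwxyzABCDEFGHIJKLMNOPQRSTUVWXYZ0123456789-')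
--     return all(c in valid_chars for c in snapshot_id)
-- ===== SOURCE B (Python) =====
-- import re
--
-- _SNAPSHOT_RE = re.compile(r'[a-zA-Z0-9][a-zA-Z0-9-]*')
--
--
-- def validate_snapshot_id(snapshot_id: str) -> bool:
--     if len(snapshot_id) > 255:
--         return False
--     return _SNAPSHOT_RE.fullmatch(snapshot_id) is not None
-- ===== Notes on version B (the rewrite author's own statement) =====
-- stated objective: idiomatic
-- what changed: Replaced the explicit first-char isalnum test and the per-character membership scan over a 63-char set with a single compiled re.fullmatch of [a-zA-Z0-9][a-zA-Z0-9-]*, keeping only the length guard; empty input is rejected by the regex itself.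
import Mathlib
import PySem

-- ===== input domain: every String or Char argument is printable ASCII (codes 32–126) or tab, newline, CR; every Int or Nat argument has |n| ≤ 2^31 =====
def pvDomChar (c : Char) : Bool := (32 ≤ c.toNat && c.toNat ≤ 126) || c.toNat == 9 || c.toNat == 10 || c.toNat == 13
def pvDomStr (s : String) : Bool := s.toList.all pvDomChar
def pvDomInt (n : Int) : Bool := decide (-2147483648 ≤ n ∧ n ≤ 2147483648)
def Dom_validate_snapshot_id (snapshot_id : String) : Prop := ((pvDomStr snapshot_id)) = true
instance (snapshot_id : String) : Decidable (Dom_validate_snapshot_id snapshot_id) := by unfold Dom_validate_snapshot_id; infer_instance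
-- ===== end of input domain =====

-- B replaces A's first-char isalnum test and per-char set scan by one regex fullmatch
-- of [a-zA-Z0-9][a-zA-Z0-9-]* (ported as its character-class matcher); return values agree.
-- ===== PORT A =====
def pvValidCharsA : PySem.Set Char :=
  PySem.Set.ofList "abcdefghijklmnopqrstuvwxyzABCDEFGHIJKLMNOPQRSTUVWXYZ0123456789-".toList

-- body of A on the character list (PySem style: strings are handled on .toList)
def pvValidateA (cs : List Char) : Bool :=
  if cs.isEmpty then false
  else if 255 < cs.length then false
  else
    match cs with
    | [] => false   -- unreachable: the list is nonempty here (Python's s[0] cannot raise)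
    | c :: _ =>
      if !(PySem.Chars.isalnum c) then false
      else cs.all (fun ch => pvValidCharsA.contains ch)

def validate_snapshot_id (snapshot_id : String) : Bool :=
  pvValidateA snapshot_id.toList

-- ===== PORT B =====
-- the regex character class [a-zA-Z0-9] (literal code-point ranges, as in re)
def pvReAlnum (c : Char) : Bool :=
  ('a' <= c && c <= 'z') || ('A' <= c && c <= 'Z') || ('0' <= c && c <= '9')

-- fullmatch of [a-zA-Z0-9][a-zA-Z0-9-]* : one leading class char, then class-or-hyphen
def pvReFullmatch (cs : List Char) : Bool :=
  match cs with
  | [] => false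
  | c :: rest => pvReAlnum c && rest.all (fun ch => pvReAlnum ch || ch == '-')

-- body of B on the character list: length guard, then the regex match
def pvValidateB (cs : List Char) : Bool :=
  if 255 < cs.length then false
  else pvReFullmatch cs

def validate_snapshot_id_alt (snapshot_id : String) : Bool :=
  pvValidateB snapshot_id.toList

-- ===== PRECONDITION & SPEC =====
def Spec_validate_snapshot_id (snapshot_id : String) (out : Bool) : Prop := out = validate_snapshot_id_alt snapshot_id
instance (snapshot_id : String) (out : Bool) : Decidable (Spec_validate_snapshot_id snapshot_id out) := by unfold Spec_validate_snapshot_id; infer_instance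

-- ===== CLAIM (what is proved, stated in full; the proofs are below) =====
def Claim_equal_validate_snapshot_id : Prop := ∀ (snapshot_id : String), Dom_validate_snapshot_id snapshot_id → Spec_validate_snapshot_id snapshot_id (validate_snapshot_id snapshot_id)

-- ===== LEMMAS AND PROOFS =====

-- per-character facts, checked by `decide` over the 128 ASCII codes and transported
set_option maxRecDepth 4096 in
lemma pvCharFact128 : ∀ n : Nat, n < 128 →
    (PySem.Chars.isalnum (Char.ofNat n) = pvReAlnum (Char.ofNat n) ∧
     pvValidCharsA.contains (Char.ofNat n) =
       (pvReAlnum (Char.ofNat n) || Char.ofNat n == '-')) := by decide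

lemma pvCharFact (c : Char) (hc : pvDomChar c = true) :
    PySem.Chars.isalnum c = pvReAlnum c ∧
    pvValidCharsA.contains c = (pvReAlnum c || c == '-') := by
  have h128 : c.toNat < 128 := by
    simp [pvDomChar] at hc
    omega
  have hco : Char.ofNat c.toNat = c := Char.ofNat_toNat c
  have := pvCharFact128 c.toNat h128
  rwa [hco] at this

-- on Dom characters the set scan and the regex class-or-hyphen test agree pointwise
lemma pvAllEq (xs : List Char) (h : ∀ x ∈ xs, pvDomChar x = true) :
    xs.all (fun ch => pvValidCharsA.contains ch) =
    xs.all (fun ch => pvReAlnum ch || ch == '-') := by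
  induction xs with
  | nil => rw [List.all_nil, List.all_nil]
  | cons x tl ih =>
    rw [List.all_cons, List.all_cons, (pvCharFact x (h x List.mem_cons_self)).2,
      ih (fun y hy => h y (List.mem_cons_of_mem _ hy))]

-- the whole comparison, stated on the character list
lemma pvCore (cs : List Char) (hall : ∀ c ∈ cs, pvDomChar c = true) :
    pvValidateA cs = pvValidateB cs := by
  unfold pvValidateA pvValidateB
  cases cs with
  | nil => simp [pvReFullmatch]
  | cons c rest =>
    rw [List.isEmpty_cons, if_neg (by decide)]
    by_cases hlen : 255 < (c :: rest).length
    · rw [if_pos hlen, if_pos hlen]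
    · rw [if_neg hlen, if_neg hlen]
      have hc := pvCharFact c (hall c (by simp))
      show (if !(PySem.Chars.isalnum c) then false
            else (c :: rest).all (fun ch => pvValidCharsA.contains ch)) = pvReFullmatch (c :: rest)
      rw [hc.1]
      by_cases hb : pvReAlnum c = true
      · rw [hb]
        show ((c :: rest).all (fun ch => pvValidCharsA.contains ch)) =
          (pvReAlnum c && rest.all (fun ch => pvReAlnum ch || ch == '-'))
        rw [List.all_cons, hc.2, hb, Bool.true_or, Bool.true_and, Bool.true_and,
          pvAllEq rest (fun x hx => hall x (List.mem_cons_of_mem _ hx))]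
      · have hb' : pvReAlnum c = false := by simpa using hb
        rw [hb']
        show false = (pvReAlnum c && rest.all (fun ch => pvReAlnum ch || ch == '-'))
        rw [hb', Bool.false_and]

-- ===== VERDICT (by name: the statement is the Claim_ definition above) =====
theorem validate_snapshot_id_spec : Claim_equal_validate_snapshot_id := by
  intro s hdom
  have hall : ∀ c ∈ s.toList, pvDomChar c = true := by
    simpa [Dom_validate_snapshot_id, pvDomStr, List.all_eq_true] using hdom
  unfold Spec_validate_snapshot_id validate_snapshot_id validate_snapshot_id_alt
  exact pvCore s.toList hall
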